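-- pv_equiv track=rewrite | github.com/ShurCGHung/problem_solving | LeetCode/problem_2264.py | are_all_characters_same
-- ===== SOURCE A (Python) =====
-- def are_all_characters_same(s) -> bool:
--     if not s:
--         return False  # Return False for an empty string
--     first_char = s[0]
--     for char in s[1:]:
--         if char != first_char:
--             return False
--     return True
-- ===== SOURCE B (Python) =====
-- def are_all_characters_same(s) -> bool:
--     return len(set(s)) == 1
-- ===== Notes on version B (the rewrite author's own statement) =====
-- stated objective: simpler
-- what changed: Replaced the first-char reference and early-exit scan with a single aggregate expression: build the set of distinct characters and test that exactly one remains (len(set(s)) == 1); empty string gives len 0, so False, matching A.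
import Mathlib
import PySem

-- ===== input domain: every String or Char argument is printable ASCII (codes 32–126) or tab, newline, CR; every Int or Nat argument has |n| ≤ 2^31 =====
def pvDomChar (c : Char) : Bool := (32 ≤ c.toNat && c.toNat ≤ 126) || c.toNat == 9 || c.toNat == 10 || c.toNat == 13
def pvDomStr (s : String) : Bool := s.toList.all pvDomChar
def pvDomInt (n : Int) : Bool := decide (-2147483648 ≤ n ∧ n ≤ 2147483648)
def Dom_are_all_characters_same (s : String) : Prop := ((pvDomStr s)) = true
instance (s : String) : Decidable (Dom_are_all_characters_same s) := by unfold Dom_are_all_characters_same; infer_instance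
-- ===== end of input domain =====

-- B replaces A's first-char reference and early-exit scan by one aggregate: len(set(s)) == 1 (objective: simpler).


-- ===== PORT A =====
-- the early-exit 'for char in s[1:]'
def aacsLoop (first : Char) : List Char → Bool
  | [] => true
  | c :: cs => if c ≠ first then false else aacsLoop first cs

def are_all_characters_same (s : String) : Bool :=
  match s.toList with
  | [] => false
  | first :: rest => aacsLoop first rest

-- ===== PORT B =====
def are_all_characters_same_alt (s : String) : Bool :=
  PySem.Set.len (PySem.Set.ofList s.toList) == 1

-- ===== PRECONDITION & SPEC =====
def Spec_are_all_characters_same (s : String) (out : Bool) : Prop := out = are_all_characters_same_alt s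
instance (s : String) (out : Bool) : Decidable (Spec_are_all_characters_same s out) := by unfold Spec_are_all_characters_same; infer_instance

-- ===== CLAIM (what is proved, stated in full; the proofs are below) =====
def Claim_equal_are_all_characters_same : Prop := ∀ (s : String), Dom_are_all_characters_same s → Spec_are_all_characters_same s (are_all_characters_same s)

-- ===== LEMMAS AND PROOFS =====

lemma len_le_foldl_add (l : List Char) : ∀ (s : PySem.Set Char),
    s.length ≤ (l.foldl PySem.Set.add s).length := by
  induction l with
  | nil => intro s; simp
  | cons c cs ih =>
    intro s
    refine le_trans ?_ (ih (PySem.Set.add s c))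
    rw [PySem.Set.add_eq_ite]
    split <;> simp

lemma aacsLoop_eq (first : Char) (rest : List Char) :
    aacsLoop first rest = ((rest.foldl PySem.Set.add [first]).length == 1) := by
  induction rest with
  | nil => rfl
  | cons c cs ih =>
    by_cases h : c = first
    · subst h
      simp [aacsLoop, ih, PySem.Set.add_of_mem]
    · have h2 : PySem.Set.add [first] c = [first, c] := by
        exact PySem.Set.add_of_not_mem (fun hm => h (List.mem_singleton.mp hm))
      have hlen := len_le_foldl_add cs [first, c]
      simp only [List.length_cons] at hlen
      have hne : (cs.foldl PySem.Set.add [first, c]).length ≠ 1 := by omega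
      simp [aacsLoop, h, hne]

-- ===== VERDICT (by name: the statement is the Claim_ definition above) =====
theorem are_all_characters_same_spec : Claim_equal_are_all_characters_same := by
  intro s _
  unfold Spec_are_all_characters_same are_all_characters_same are_all_characters_same_alt
  cases h : s.toList with
  | nil => simp [PySem.Set.ofList, PySem.Set.len]
  | cons first rest =>
    show aacsLoop first rest = _
    rw [aacsLoop_eq]
    simp [PySem.Set.len, PySem.Set.ofList_eq_foldl]
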